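-- pv_equiv track=rewrite | github.com/al-mcintyre/mCaller_analysis_scripts | figure3/iupac2regex.py | i2r
-- ===== SOURCE A (Python) =====
-- def i2r(iupac,rev=False):
--     iupac2regex = iupac2regex = {'A':'A','C':'C','G':'G','T':'T','R':'[AG]','Y':'[CT]','B':'[CGT]','D':'[AGT]','H':'[ACT]','V':'[ACG]','N':'[ACGT]','K':'[GT]','M':'[AC]','W':'[AT]','S':'[GC]'}
--     if rev:
--         comp = {'A':'T','C':'G','G':'C','T':'A','N':'N','K':'M','W':'S','M':'K','Y':'R','R':'Y','B':'A','D':'C','H':'G','V':'T','S':'W'}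
--         iupac_target = ''.join([comp[i] for i in list(iupac)])
--     else:
--         iupac_target = iupac
--     return(''.join([iupac2regex[i] for i in list(iupac_target)]))
-- ===== SOURCE B (Python) =====
-- # B: one linear scan of a flat (key, fwd_regex, rev_regex) triple list per character,
-- # accumulated in an explicit loop -- no dicts, no intermediate complemented string.
-- _PAIRS = [
--     ('A', 'A', 'T'), ('C', 'C', 'G'), ('G', 'G', 'C'), ('T', 'T', 'A'),
--     ('R', '[AG]', '[CT]'), ('Y', '[CT]', '[AG]'), ('B', '[CGT]', 'A'),
--     ('D', '[AGT]', 'C'), ('H', '[ACT]', 'G'), ('V', '[ACG]', 'T'),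
--     ('N', '[ACGT]', '[ACGT]'), ('K', '[GT]', '[AC]'), ('M', '[AC]', '[GT]'),
--     ('W', '[AT]', '[GC]'), ('S', '[GC]', '[AT]'),
-- ]
--
-- def i2r(iupac, rev=False):
--     out = []
--     for c in iupac:
--         for k, f, r in _PAIRS:
--             if k == c:
--                 out.append(r if rev else f)
--                 break
--     return ''.join(out)
-- ===== Notes on version B (the rewrite author's own statement) =====
-- stated objective: alternative
-- what changed: B replaces A's two dicts and (for rev) two staged join passes by a single accumulator loop that, per character, linearly scans one flat (key, fwd_regex, rev_regex) triple table and appends the fused regex directly, with no intermediate complemented string. Pre_ excludes only inputs with characters outside the 15 IUPAC codes, on which A raises KeyError.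
import Mathlib
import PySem

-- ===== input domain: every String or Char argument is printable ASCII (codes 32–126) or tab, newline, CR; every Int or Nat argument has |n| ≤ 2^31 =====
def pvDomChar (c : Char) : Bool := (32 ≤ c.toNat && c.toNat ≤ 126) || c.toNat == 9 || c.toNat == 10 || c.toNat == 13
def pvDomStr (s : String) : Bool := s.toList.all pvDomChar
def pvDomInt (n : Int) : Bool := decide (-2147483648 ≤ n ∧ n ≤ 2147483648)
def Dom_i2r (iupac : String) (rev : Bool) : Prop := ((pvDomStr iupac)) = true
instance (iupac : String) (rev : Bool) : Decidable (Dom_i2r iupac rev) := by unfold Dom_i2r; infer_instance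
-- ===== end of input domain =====

-- B replaces A's two dicts and (for rev) two staged passes by one accumulator loop that
-- linearly scans a flat fused triple table per character; objective: alternative.

-- ===== PORT A =====
def i2rRegexDict : PySem.Dict String String := PySem.Dict.ofList
  [("A","A"),("C","C"),("G","G"),("T","T"),("R","[AG]"),("Y","[CT]"),("B","[CGT]"),
   ("D","[AGT]"),("H","[ACT]"),("V","[ACG]"),("N","[ACGT]"),("K","[GT]"),("M","[AC]"),
   ("W","[AT]"),("S","[GC]")]

def i2rCompDict : PySem.Dict String String := PySem.Dict.ofList
  [("A","T"),("C","G"),("G","C"),("T","A"),("N","N"),("K","M"),("W","S"),("M","K"),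
   ("Y","R"),("R","Y"),("B","A"),("D","C"),("H","G"),("V","T"),("S","W")]

-- dict lookup d[c] ported as getD with default ""; Pre_ excludes the inputs where Python raises KeyError
def i2r (iupac : String) (rev : Bool) : String :=
  let iupacTarget : String :=
    if rev then
      PySem.Str.join "" (iupac.toList.map (fun i => i2rCompDict.getD (String.singleton i) ""))
    else iupac
  PySem.Str.join "" (iupacTarget.toList.map (fun i => i2rRegexDict.getD (String.singleton i) ""))

-- ===== PORT B =====
-- flat triple table (key, forward regex, fused reverse-complement regex), as in Source B
def i2rPairs : List (Char × String × String) :=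
  [('A', "A", "T"), ('C', "C", "G"), ('G', "G", "C"), ('T', "T", "A"),
   ('R', "[AG]", "[CT]"), ('Y', "[CT]", "[AG]"), ('B', "[CGT]", "A"),
   ('D', "[AGT]", "C"), ('H', "[ACT]", "G"), ('V', "[ACG]", "T"),
   ('N', "[ACGT]", "[ACGT]"), ('K', "[GT]", "[AC]"), ('M', "[AC]", "[GT]"),
   ('W', "[AT]", "[GC]"), ('S', "[GC]", "[AT]")]

-- inner loop: linear scan with break; no match appends nothing
def i2rScanOut (c : Char) (rev : Bool) : List (Char × String × String) → List String
  | [] => []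
  | (k, f, r) :: rest => if k = c then [if rev then r else f] else i2rScanOut c rev rest

-- outer loop: the pieces appended to `out`, in order
def i2rCollect (rev : Bool) : List Char → List String
  | [] => []
  | c :: cs => i2rScanOut c rev i2rPairs ++ i2rCollect rev cs

def i2r_alt (iupac : String) (rev : Bool) : String :=
  PySem.Str.join "" (i2rCollect rev iupac.toList)

-- ===== PRECONDITION & SPEC =====
-- Pre_: every character is one of the 15 IUPAC codes; on any other character A raises KeyError.
def Pre_i2r (iupac : String) (rev : Bool) : Prop :=
  (iupac.toList.all (fun c => "ACGTRYBDHVNKMWS".toList.contains c)) = true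
instance (iupac : String) (rev : Bool) : Decidable (Pre_i2r iupac rev) := by unfold Pre_i2r; infer_instance

def pvWitness_i2r : String × Bool := ("ACGT", true)

def Spec_i2r (iupac : String) (rev : Bool) (out : String) : Prop := out = i2r_alt iupac rev
instance (iupac : String) (rev : Bool) (out : String) : Decidable (Spec_i2r iupac rev out) := by unfold Spec_i2r; infer_instance

-- ===== CLAIM (what is proved, stated in full; the proofs are below) =====
def Claim_equal_i2r : Prop := ∀ (iupac : String) (rev : Bool), Dom_i2r iupac rev → Pre_i2r iupac rev → Spec_i2r iupac rev (i2r iupac rev)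

-- ===== LEMMAS AND PROOFS =====
theorem i2rKeys_eq : "ACGTRYBDHVNKMWS".toList = ['A','C','G','T','R','Y','B','D','H','V','N','K','M','W','S'] := by decide

-- the complement of an IUPAC character, as a Char (proof-side helper)
def i2rCompChar (c : Char) : Char :=
  ((i2rCompDict.getD (String.singleton c) " ").toList).headD ' '

set_option maxRecDepth 40000 in
theorem i2r_comp_singleton : ∀ c ∈ ['A','C','G','T','R','Y','B','D','H','V','N','K','M','W','S'],
    (i2rCompDict.getD (String.singleton c) "").toList = [i2rCompChar c] := by
  intro c hc; fin_cases hc <;> rfl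

set_option maxRecDepth 40000 in
theorem i2r_scan_fwd : ∀ c ∈ ['A','C','G','T','R','Y','B','D','H','V','N','K','M','W','S'],
    i2rScanOut c false i2rPairs = [i2rRegexDict.getD (String.singleton c) ""] := by
  intro c hc; fin_cases hc <;> rfl

set_option maxRecDepth 40000 in
theorem i2r_scan_rev : ∀ c ∈ ['A','C','G','T','R','Y','B','D','H','V','N','K','M','W','S'],
    i2rScanOut c true i2rPairs = [i2rRegexDict.getD (String.singleton (i2rCompChar c)) ""] := by
  intro c hc; fin_cases hc <;> rfl

theorem i2rCollect_eq_map (rev : Bool) (g : Char → String)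
    (l : List Char)
    (h : ∀ c ∈ l, i2rScanOut c rev i2rPairs = [g c]) :
    i2rCollect rev l = l.map g := by
  induction l with
  | nil => rfl
  | cons c cs ih =>
    simp only [i2rCollect, List.map_cons]
    rw [h c (List.mem_cons_self), ih (fun d hd => h d (List.mem_cons_of_mem _ hd))]
    rfl

-- ===== VERDICT (by name: the statement is the Claim_ definition above) =====
set_option maxHeartbeats 1000000 in
theorem i2r_spec : Claim_equal_i2r := by
  intro iupac rev _ hpre'
  have hpre : ∀ c ∈ iupac.toList, c ∈ ['A','C','G','T','R','Y','B','D','H','V','N','K','M','W','S'] := by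
    intro c hc
    have := List.all_eq_true.mp hpre' c hc
    rw [i2rKeys_eq] at this
    simpa using this
  unfold Spec_i2r i2r i2r_alt
  cases rev
  · dsimp only
    rw [if_neg (by decide)]
    rw [i2rCollect_eq_map false (fun c => i2rRegexDict.getD (String.singleton c) "")
      iupac.toList (fun c hc => i2r_scan_fwd c (hpre c hc))]
  · dsimp only
    rw [if_pos rfl]
    have h1 : (PySem.Str.join ""
        (iupac.toList.map (fun i => i2rCompDict.getD (String.singleton i) ""))).toList
        = iupac.toList.map i2rCompChar := by
      rw [PySem.Str.toList_join, List.map_map]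
      have : iupac.toList.map (String.toList ∘ fun i => i2rCompDict.getD (String.singleton i) "")
          = (iupac.toList.map i2rCompChar).map (fun c => [c]) := by
        rw [List.map_map]
        exact List.map_congr_left (fun c hc => i2r_comp_singleton c (hpre c hc))
      rw [this]
      exact PySem.Chars.join_nil_singletons _
    rw [h1, List.map_map,
      i2rCollect_eq_map true (fun c => i2rRegexDict.getD (String.singleton (i2rCompChar c)) "")
        iupac.toList (fun c hc => i2r_scan_rev c (hpre c hc))]
    rfl
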